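-- pv_equiv track=rewrite | github.com/Sybertnetics-Artificial-Intelligence/RunaLang | runa/runa_bootstrap.py | preprocess_runa_code
-- ===== SOURCE A (Python) =====
-- def preprocess_runa_code(code: str) -> str:
--     """
--     Preprocess Runa code to expand for-loops and other complex constructs.
--     This is a workaround for the bootstrap runner's limited execution model.
--     """
--     lines = code.split('\n')
--     expanded_lines = []
--     i = 0
--
--     while i < len(lines):
--         line = lines[i].strip()
--
--         # Look for for-each loops with index
--         if line.startswith('For each ') and ' with index ' in line and ' in ' in line:
--             # Parse the for-loop
--             loop_def = line[9:].strip()  # Remove "For each "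
--             parts = loop_def.split(' with index ')
--             var_name = parts[0].strip()
--             index_and_collection = parts[1].strip()
--
--             if ' in ' in index_and_collection:
--                 index_var, collection_name = index_and_collection.split(' in ', 1)
--                 index_var = index_var.strip()
--                 collection_name = collection_name.strip().rstrip(':')
--
--                 # Find the loop body (indented lines)
--                 loop_body = []
--                 i += 1
--                 while i < len(lines) and (lines[i].startswith('    ') or lines[i].strip() == ''):
--                     if lines[i].strip():  # Skip empty lines
--                         loop_body.append(lines[i][4:])  # Remove indentation
--                     i += 1
--                 i -= 1  # Back up one line
--
--                 # Generate expanded code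
--                 expanded_lines.append(f"# Expanded for-loop: {line}")
--
--                 # For now, just handle the case we know exists (basic collection access)
--                 # In a full implementation, we'd evaluate the collection
--                 # For the VM, we know there are typically small loops, so we'll simulate
--                 for idx in range(10):  # Assume max 10 iterations for safety
--                     expanded_lines.append(f"# Loop iteration {idx}")
--                     expanded_lines.append(f"Let {index_var} be {idx}")
--
--                     # Check if collection exists and has this index
--                     expanded_lines.append(f"If {idx} is less than length of {collection_name}:")
--                     expanded_lines.append(f"    Let {var_name} be {collection_name} at index {idx}")
--
--                     # Add loop body with proper variable substitution
--                     for body_line in loop_body: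
--                         expanded_lines.append(f"    {body_line}")
--
--                     # Add early exit condition
--                     expanded_lines.append(f"If {idx} is greater than or equal to length of {collection_name}:")
--                     expanded_lines.append(f"    # Exit loop")
--                     expanded_lines.append(f"    Continue")
--         else:
--             expanded_lines.append(line)
--
--         i += 1
--
--     return '\n'.join(expanded_lines)
-- ===== SOURCE B (Python) =====
-- def preprocess_runa_code(code: str) -> str:
--     """Two-pass rewrite: pass 1 segments the lines into plain lines and parsed
--     loop blocks; pass 2 renders each segment."""
--     lines = code.split('\n')
--
--     # Pass 1: build an ordered list of segments.
--     segments = []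
--     i = 0
--     n = len(lines)
--     while i < n:
--         line = lines[i].strip()
--         if line.startswith('For each ') and ' with index ' in line and ' in ' in line:
--             loop_def = line[9:].strip()
--             parts = loop_def.split(' with index ')
--             var_name = parts[0].strip()
--             index_and_collection = parts[1].strip()
--             if ' in ' in index_and_collection:
--                 index_var, collection_name = index_and_collection.split(' in ', 1)
--                 body = []
--                 i += 1
--                 while i < n and (lines[i].startswith('    ') or lines[i].strip() == ''):
--                     if lines[i].strip():
--                         body.append(lines[i][4:])
--                     i += 1
--                 segments.append(('loop', line, var_name, index_var.strip(),
--                                  collection_name.strip().rstrip(':'), body))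
--                 continue
--             # malformed header (no ' in ' after the index part): emits nothing,
--             # and the following lines are processed normally
--         else:
--             segments.append(('line', line))
--         i += 1
--
--     # Pass 2: render every segment and join.
--     return '\n'.join(s for seg in segments for s in _render_seg(seg))
--
--
-- def _render_seg(seg):
--     if seg[0] == 'line':
--         return [seg[1]]
--     _, line, var_name, index_var, collection_name, body = seg
--     return ["# Expanded for-loop: " + line] + [
--         s for idx in range(10)
--         for s in _render_iter(idx, var_name, index_var, collection_name, body)
--     ]
--
--
-- def _render_iter(idx, var_name, index_var, collection_name, body):
--     return ([f"# Loop iteration {idx}",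
--              f"Let {index_var} be {idx}",
--              f"If {idx} is less than length of {collection_name}:",
--              f"    Let {var_name} be {collection_name} at index {idx}"]
--             + ["    " + b for b in body]
--             + [f"If {idx} is greater than or equal to length of {collection_name}:",
--                "    # Exit loop",
--                "    Continue"])
-- ===== Notes on version B (the rewrite author's own statement) =====
-- stated objective: alternative
-- what changed: B replaces A's single interleaved while-loop (which parses headers and emits expanded lines into one growing list with an i-=1/i+=1 index dance) by two passes: pass 1 segments the lines into plain lines and parsed loop blocks (an explicit intermediate segment list), pass 2 renders each segment via flatten, so parsing and code generation are fully separated.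
import Mathlib
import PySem

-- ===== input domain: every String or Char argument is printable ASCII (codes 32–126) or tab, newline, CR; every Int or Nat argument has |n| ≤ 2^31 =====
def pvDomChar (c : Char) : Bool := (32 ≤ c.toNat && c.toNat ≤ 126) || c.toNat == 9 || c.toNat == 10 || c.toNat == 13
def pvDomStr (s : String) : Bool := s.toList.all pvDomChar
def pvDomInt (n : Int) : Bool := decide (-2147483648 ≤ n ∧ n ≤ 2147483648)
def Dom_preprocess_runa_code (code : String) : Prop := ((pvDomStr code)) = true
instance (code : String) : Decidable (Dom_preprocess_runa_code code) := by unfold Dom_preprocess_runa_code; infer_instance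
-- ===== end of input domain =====

-- B is a two-pass re-implementation (segment the lines, then render); same return value as A
-- on every input where A returns (A raises IndexError on some malformed headers — see Pre_).

-- shared primitive: Python's s.rstrip(':') — PySem has no rstrip-with-chars, ported by hand,
-- exact: removes exactly the trailing ':' characters.
def pvRstripColon (s : String) : String :=
  String.ofList ((s.toList.reverse.dropWhile (· == ':')).reverse)

-- ===== PORT A =====
-- A's inner while loop over the lines after the header: collects the loop body
-- (non-blank indented/blank lines, each truncated by 4 chars) and returns the remainder;
-- A's 'i -= 1' followed by the outer 'i += 1' means the scan resumes at that remainder.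
def pvConsumeBody : List String → List String × List String
  | [] => ([], [])
  | l :: rest =>
    if PySem.Str.startswith l "    " || PySem.Str.strip l == "" then
      let p := pvConsumeBody rest
      (if PySem.Str.strip l == "" then p.1 else PySem.Str.slice l (some 4) none :: p.1, p.2)
    else ([], l :: rest)

lemma pvConsumeBody_len : ∀ ls : List String, (pvConsumeBody ls).2.length ≤ ls.length := by
  intro ls
  induction ls with
  | nil => simp [pvConsumeBody]
  | cons l rest ih =>
    simp only [pvConsumeBody]
    split
    · simpa using Nat.le_succ_of_le ih
    · simp

-- A's range(10) expansion loop, appending line by line as A does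
def pvAExpand (line var_name index_var collection_name : String)
    (loop_body : List String) : List String :=
  (PySem.List.pyRange 0 10 1).foldl (fun acc idx =>
    let acc := acc ++ ["# Loop iteration " ++ PySem.Int.toStr idx]
    let acc := acc ++ ["Let " ++ index_var ++ " be " ++ PySem.Int.toStr idx]
    let acc := acc ++ ["If " ++ PySem.Int.toStr idx ++ " is less than length of " ++ collection_name ++ ":"]
    let acc := acc ++ ["    Let " ++ var_name ++ " be " ++ collection_name ++ " at index " ++ PySem.Int.toStr idx]
    let acc := loop_body.foldl (fun acc body_line => acc ++ ["    " ++ body_line]) acc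
    let acc := acc ++ ["If " ++ PySem.Int.toStr idx ++ " is greater than or equal to length of " ++ collection_name ++ ":"]
    let acc := acc ++ ["    # Exit loop"]
    acc ++ ["    Continue"])
    ["# Expanded for-loop: " ++ line]

-- A's outer while loop, as recursion on the remaining lines
def pvALoop : List String → List String
  | [] => []
  | l :: rest =>
    let line := PySem.Str.strip l
    if PySem.Str.startswith line "For each " && PySem.Str.isIn " with index " line
        && PySem.Str.isIn " in " line then
      let loop_def := PySem.Str.strip (PySem.Str.slice line (some 9) none)
      let parts := (PySem.Str.split? loop_def " with index ").getD []
      let var_name := PySem.Str.strip (PySem.List.pyGetD parts 0 "")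
      let index_and_collection := PySem.Str.strip (PySem.List.pyGetD parts 1 "")
      if PySem.Str.isIn " in " index_and_collection then
        let sp := (PySem.Str.splitMax? index_and_collection " in " 1).getD []
        let index_var := PySem.Str.strip (PySem.List.pyGetD sp 0 "")
        let collection_name := pvRstripColon (PySem.Str.strip (PySem.List.pyGetD sp 1 ""))
        let p := pvConsumeBody rest
        pvAExpand line var_name index_var collection_name p.1 ++ pvALoop p.2
      else
        pvALoop rest
    else
      line :: pvALoop rest
  termination_by ls => ls.length
  decreasing_by
  · exact Nat.lt_succ_of_le (pvConsumeBody_len rest)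
  · simp
  · simp

def preprocess_runa_code (code : String) : String :=
  PySem.Str.join "\n" (pvALoop ((PySem.Str.split? code "\n").getD []))

-- ===== PORT B =====
-- a segment is either a plain (stripped) line or a parsed loop block with its body
inductive PvSeg
  | plain : String → PvSeg
  | loop : String → String → String → String → List String → PvSeg

-- pass 1: segment the lines (the body scan is the same primitive scan as A's)
def pvSegment : List String → List PvSeg
  | [] => []
  | l :: rest =>
    let line := PySem.Str.strip l
    if PySem.Str.startswith line "For each " && PySem.Str.isIn " with index " line
        && PySem.Str.isIn " in " line then
      let loop_def := PySem.Str.strip (PySem.Str.slice line (some 9) none)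
      let parts := (PySem.Str.split? loop_def " with index ").getD []
      let var_name := PySem.Str.strip (PySem.List.pyGetD parts 0 "")
      let index_and_collection := PySem.Str.strip (PySem.List.pyGetD parts 1 "")
      if PySem.Str.isIn " in " index_and_collection then
        let sp := (PySem.Str.splitMax? index_and_collection " in " 1).getD []
        let p := pvConsumeBody rest
        PvSeg.loop line var_name (PySem.Str.strip (PySem.List.pyGetD sp 0 ""))
            (pvRstripColon (PySem.Str.strip (PySem.List.pyGetD sp 1 ""))) p.1
          :: pvSegment p.2
      else
        pvSegment rest
    else
      PvSeg.plain line :: pvSegment rest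
  termination_by ls => ls.length
  decreasing_by
  · exact Nat.lt_succ_of_le (pvConsumeBody_len rest)
  · simp
  · simp

-- pass 2: render one loop iteration / one segment
def pvRenderIter (idx : Int) (var_name index_var collection_name : String)
    (body : List String) : List String :=
  (["# Loop iteration " ++ PySem.Int.toStr idx,
    "Let " ++ index_var ++ " be " ++ PySem.Int.toStr idx,
    "If " ++ PySem.Int.toStr idx ++ " is less than length of " ++ collection_name ++ ":",
    "    Let " ++ var_name ++ " be " ++ collection_name ++ " at index " ++ PySem.Int.toStr idx]
   ++ body.map (fun b => "    " ++ b))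
  ++ ["If " ++ PySem.Int.toStr idx ++ " is greater than or equal to length of " ++ collection_name ++ ":",
      "    # Exit loop",
      "    Continue"]

def pvRenderSeg : PvSeg → List String
  | .plain s => [s]
  | .loop line var_name index_var collection_name body =>
    ("# Expanded for-loop: " ++ line)
      :: (PySem.List.pyRange 0 10 1).flatMap
          (fun idx => pvRenderIter idx var_name index_var collection_name body)

def preprocess_runa_code_alt (code : String) : String :=
  PySem.Str.join "\n"
    ((pvSegment ((PySem.Str.split? code "\n").getD [])).flatMap pvRenderSeg)

-- ===== PRECONDITION & SPEC =====
-- Pre_ excludes exactly the inputs on which A raises IndexError: a line whose stripped form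
-- matches A's for-loop header pattern but where the with-index marker no longer occurs in the
-- stripped tail line[9:].strip() (its only occurrence straddled the strip), so parts[1] does
-- not exist.
def Pre_preprocess_runa_code (code : String) : Prop :=
  ∀ l ∈ (PySem.Str.split? code "\n").getD [],
    (PySem.Str.startswith (PySem.Str.strip l) "For each "
      && PySem.Str.isIn " with index " (PySem.Str.strip l)
      && PySem.Str.isIn " in " (PySem.Str.strip l)) = true →
    PySem.Str.isIn " with index "
      (PySem.Str.strip (PySem.Str.slice (PySem.Str.strip l) (some 9) none)) = true
instance (code : String) : Decidable (Pre_preprocess_runa_code code) := by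
  unfold Pre_preprocess_runa_code; infer_instance

def pvWitness_preprocess_runa_code : String :=
  "For each x with index i in xs:\n    Let y be x\nLet z be 1"

def Spec_preprocess_runa_code (code : String) (out : String) : Prop :=
  out = preprocess_runa_code_alt code
instance (code : String) (out : String) : Decidable (Spec_preprocess_runa_code code out) := by
  unfold Spec_preprocess_runa_code; infer_instance

-- ===== CLAIM (what is proved, stated in full; the proofs are below) =====
def Claim_equal_preprocess_runa_code : Prop := ∀ (code : String), Dom_preprocess_runa_code code → Pre_preprocess_runa_code code → Spec_preprocess_runa_code code (preprocess_runa_code code)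

-- ===== LEMMAS AND PROOFS =====

lemma pvExpand_eq (line v i c : String) (body : List String) :
    pvAExpand line v i c body = pvRenderSeg (PvSeg.loop line v i c body) := by
  simp only [pvAExpand, PySem.List.foldl_append_singleton_eq_map]
  simp only [List.append_assoc, List.singleton_append]
  rw [PySem.List.foldl_append_eq_flatMap]
  simp [pvRenderSeg, pvRenderIter]

lemma pvLoop_eq : ∀ ls : List String, pvALoop ls = (pvSegment ls).flatMap pvRenderSeg
  | [] => by rw [pvALoop, pvSegment]; rfl
  | l :: rest => by
    rw [pvALoop, pvSegment]
    simp only []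
    by_cases h1 : (PySem.Str.startswith (PySem.Str.strip l) "For each "
        && PySem.Str.isIn " with index " (PySem.Str.strip l)
        && PySem.Str.isIn " in " (PySem.Str.strip l)) = true
    · simp only [h1, if_true]
      by_cases h2 : PySem.Str.isIn " in "
          (PySem.Str.strip (PySem.List.pyGetD
            ((PySem.Str.split? (PySem.Str.strip (PySem.Str.slice (PySem.Str.strip l) (some 9)))
              " with index ").getD []) 1 "")) = true
      · simp only [h2, if_true, List.flatMap_cons]
        rw [pvExpand_eq, pvLoop_eq (pvConsumeBody rest).2]
      · simp only [h2, Bool.false_eq_true, if_false]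
        exact pvLoop_eq rest
    · simp only [h1, Bool.false_eq_true, if_false, List.flatMap_cons, pvRenderSeg,
        List.singleton_append]
      rw [pvLoop_eq rest]
  termination_by ls => ls.length
  decreasing_by
  · exact Nat.lt_succ_of_le (pvConsumeBody_len rest)
  · simp
  · simp

-- ===== VERDICT (by name: the statement is the Claim_ definition above) =====
theorem preprocess_runa_code_spec : Claim_equal_preprocess_runa_code := by
  intro code _ _
  unfold Spec_preprocess_runa_code preprocess_runa_code preprocess_runa_code_alt
  rw [pvLoop_eq]
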